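-- pv_equiv track=rewrite | github.com/Ashishkumar448/GFG-Problem-of-the-day | 2025-08-August-GFG-POTD/August 03 - 2D Difference Array/Solution.py | applyDiff2D
-- ===== SOURCE A (Python) =====
-- def applyDiff2D(mat, opr):
--     n = len(mat)
--     m = len(mat[0])
--
--     # Step 1: Initialize diff matrix
--     diff = [[0] * (m + 2) for _ in range(n + 2)]  # Padding to avoid bounds check
--
--     # Step 2: Apply operations to diff matrix
--     for op in opr:
--         val, r1, c1, r2, c2 = op
--         diff[r1][c1] += val
--         if c2 + 1 < m:
--             diff[r1][c2 + 1] -= val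
--         if r2 + 1 < n:
--             diff[r2 + 1][c1] -= val
--         if r2 + 1 < n and c2 + 1 < m:
--             diff[r2 + 1][c2 + 1] += val
--
--     # Step 3: 2D prefix sum over rows
--     for i in range(n):
--         for j in range(1, m):
--             diff[i][j] += diff[i][j - 1]
--
--     # Step 4: 2D prefix sum over columns
--     for j in range(m):
--         for i in range(1, n):
--             diff[i][j] += diff[i - 1][j]
--
--     # Step 5: Add diff to original matrix and prepare result
--     res = []
--     for i in range(n):
--         row = []
--         for j in range(m):
--             row.append(mat[i][j] + diff[i][j])
--         res.append(row)
--
--     return res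
-- ===== SOURCE B (Python) =====
-- def applyDiff2D(mat, opr):
--     n = len(mat)
--     m = len(mat[0])
--
--     # Difference grid with a sentinel row/column pair: clamping a corner into the
--     # padding (instead of guarding the write) keeps it out of the prefix region.
--     diff = [[0] * (m + 2) for _ in range(n + 2)]
--     for val, r1, c1, r2, c2 in opr:
--         diff[r1][c1] += val
--         diff[r1][min(c2 + 1, m)] -= val
--         diff[min(r2 + 1, n)][c1] -= val
--         diff[min(r2 + 1, n)][min(c2 + 1, m)] += val
--
--     # One fused pass: running column sums give the 2D prefix cell by cell,
--     # added straight into a cropped copy of the matrix.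
--     res = [row[:m] for row in mat]
--     col = [0] * m
--     for i in range(n):
--         run = 0
--         for j in range(m):
--             col[j] += diff[i][j]
--             run += col[j]
--             res[i][j] += run
--     return res
-- ===== Notes on version B (the rewrite author's own statement) =====
-- stated objective: alternative
-- what changed: B keeps the difference grid but writes the four corners unconditionally, clamped into the padding, instead of A's three guarded writes, and replaces A's two separate in-place prefix-sum passes plus a third render loop by one fused pass that maintains running column sums and adds the 2D prefix straight into a cropped copy of the matrix.
import Mathlib
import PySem

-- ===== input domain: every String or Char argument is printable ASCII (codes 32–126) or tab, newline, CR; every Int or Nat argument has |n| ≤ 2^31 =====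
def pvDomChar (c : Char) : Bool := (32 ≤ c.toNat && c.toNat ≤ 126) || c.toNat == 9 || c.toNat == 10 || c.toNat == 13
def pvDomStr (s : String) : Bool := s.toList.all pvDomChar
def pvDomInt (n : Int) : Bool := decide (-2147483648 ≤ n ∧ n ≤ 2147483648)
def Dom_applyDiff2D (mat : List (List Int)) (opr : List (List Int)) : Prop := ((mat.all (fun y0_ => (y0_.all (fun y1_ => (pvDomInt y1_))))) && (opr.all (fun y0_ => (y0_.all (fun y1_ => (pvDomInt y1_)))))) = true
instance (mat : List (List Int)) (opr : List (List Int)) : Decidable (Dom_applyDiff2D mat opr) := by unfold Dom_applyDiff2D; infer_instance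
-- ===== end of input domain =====

-- B keeps the difference grid but replaces A's guarded corner writes by unconditional writes
-- clamped into the padding, and replaces A's two in-place prefix passes plus render loop by one
-- fused pass with running column sums into a cropped copy of the matrix (alternative
-- decomposition; return-value equivalence only: A and B both leave `mat` unmutated in Python).


-- ===== PORT A =====
-- shared primitive: Python `d[i][j] += v`; where Python would raise IndexError we
-- return d unchanged (such indices lie outside Pre_applyDiff2D)
def bump (d : List (List Int)) (i j v : Int) : List (List Int) :=
  match PySem.List.pyGet? d i with
  | none => d
  | some row =>
    match PySem.List.pyGet? row j with
    | none => d
    | some x => PySem.List.pySetD d i (PySem.List.pySetD row j (x + v))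

-- Python `d[i][j]` read; the 0 default is unreachable under Pre_applyDiff2D
def readC (d : List (List Int)) (i j : Int) : Int :=
  (PySem.List.pyGet? ((PySem.List.pyGet? d i).getD []) j).getD 0

-- Step 1: diff = [[0]*(m+2) for _ in range(n+2)]
def pad (nN mN : Nat) : List (List Int) :=
  List.replicate (nN + 2) (List.replicate (mN + 2) (0 : Int))

-- Step 2 body: one operation applied to the diff matrix (guards as in A)
def diffOp (n m : Int) (d : List (List Int)) (op : List Int) : List (List Int) :=
  match op with
  | [v, r1, c1, r2, c2] =>
    let d := bump d r1 c1 v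
    let d := if c2 + 1 < m then bump d r1 (c2 + 1) (-v) else d
    let d := if r2 + 1 < n then bump d (r2 + 1) c1 (-v) else d
    if r2 + 1 < n ∧ c2 + 1 < m then bump d (r2 + 1) (c2 + 1) v else d
  | _ => d  -- Python unpacking raises ValueError here; outside Pre_applyDiff2D

-- Step 3 body: for j in range(1, m): diff[i][j] += diff[i][j-1]
def rowStep (m : Int) (d : List (List Int)) (i : Int) : List (List Int) :=
  (PySem.List.pyRange 1 m 1).foldl (fun d j => bump d i j (readC d i (j - 1))) d

-- Step 4 body: for i in range(1, n): diff[i][j] += diff[i-1][j]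
def colStep (n : Int) (d : List (List Int)) (j : Int) : List (List Int) :=
  (PySem.List.pyRange 1 n 1).foldl (fun d i => bump d i j (readC d (i - 1) j)) d

-- Step 5: res built row by row with append
def render (mat diff : List (List Int)) : List (List Int) :=
  (PySem.List.pyRange 0 (mat.length : Int) 1).foldl (fun res i =>
    res ++ [(PySem.List.pyRange 0 (((mat.getD 0 []).length : Nat) : Int) 1).foldl
      (fun row j => row ++ [readC mat i j + readC diff i j]) []]) []

def applyDiff2D (mat : List (List Int)) (opr : List (List Int)) : List (List Int) :=
  let nN : Nat := mat.length
  let mN : Nat := (mat.getD 0 []).length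
  render mat
    ((PySem.List.pyRange 0 (mN : Int) 1).foldl (colStep (nN : Int))
      ((PySem.List.pyRange 0 (nN : Int) 1).foldl (rowStep (mN : Int))
        (opr.foldl (diffOp (nN : Int) (mN : Int)) (pad nN mN))))

-- ===== PORT B =====
-- Python `l[j]` read on a flat int list (in range under Pre_applyDiff2D)
def readV (l : List Int) (j : Int) : Int := (PySem.List.pyGet? l j).getD 0

-- one operation: four unconditional corner writes, clamped into the padding
def diffOpB (n m : Int) (d : List (List Int)) (op : List Int) : List (List Int) :=
  match op with
  | [v, r1, c1, r2, c2] =>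
    let d := bump d r1 c1 v
    let d := bump d r1 (min (c2 + 1) m) (-v)
    let d := bump d (min (r2 + 1) n) c1 (-v)
    bump d (min (r2 + 1) n) (min (c2 + 1) m) v
  | _ => d  -- Python unpacking raises ValueError here; outside Pre_applyDiff2D

-- fused pass, inner step: col[j] += diff[i][j]; run += col[j]; res[i][j] += run
def fuseCell (dB : List (List Int)) (i : Int) (st : List Int × Int × List (List Int)) (j : Int) :
    List Int × Int × List (List Int) :=
  let x := readV st.1 j + readC dB i j
  (PySem.List.pySetD st.1 j x, st.2.1 + x, bump st.2.2 i j (st.2.1 + x))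

-- fused pass, one row: run starts at 0
def fuseRow (dB : List (List Int)) (m : Int) (st : List Int × List (List Int)) (i : Int) :
    List Int × List (List Int) :=
  let r := (PySem.List.pyRange 0 m 1).foldl (fuseCell dB i) (st.1, 0, st.2)
  (r.1, r.2.2)

def applyDiff2D_alt (mat : List (List Int)) (opr : List (List Int)) : List (List Int) :=
  let nN : Nat := mat.length
  let mN : Nat := (mat.getD 0 []).length
  let dB := opr.foldl (diffOpB (nN : Int) (mN : Int)) (pad nN mN)
  ((PySem.List.pyRange 0 (nN : Int) 1).foldl (fuseRow dB (mN : Int))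
    (List.replicate mN (0 : Int),
     mat.map (fun row => PySem.List.slice row none (some (mN : Int))))).2

-- ===== PRECONDITION & SPEC =====
-- Pre_applyDiff2D is exactly the set of inputs on which A returns (no exception): a nonempty
-- matrix whose rows are at least as long as row 0, and operations of exactly five integers
-- whose used corner indices stay inside Python's legal (possibly negative) index range of the
-- padded (n+2) x (m+2) difference grid.
def Pre_applyDiff2D (mat : List (List Int)) (opr : List (List Int)) : Prop :=
  mat ≠ [] ∧
  (∀ row ∈ mat, (mat.getD 0 []).length ≤ row.length) ∧
  (∀ op ∈ opr, op.length = 5 ∧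
    -((mat.length : Int) + 2) ≤ op.getD 1 0 ∧ op.getD 1 0 ≤ (mat.length : Int) + 1 ∧
    -(((mat.getD 0 []).length : Int) + 2) ≤ op.getD 2 0 ∧
    op.getD 2 0 ≤ ((mat.getD 0 []).length : Int) + 1 ∧
    (op.getD 4 0 + 1 < ((mat.getD 0 []).length : Int) →
      -(((mat.getD 0 []).length : Int) + 2) ≤ op.getD 4 0 + 1) ∧
    (op.getD 3 0 + 1 < (mat.length : Int) → -((mat.length : Int) + 2) ≤ op.getD 3 0 + 1))
instance (mat : List (List Int)) (opr : List (List Int)) : Decidable (Pre_applyDiff2D mat opr) := by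
  unfold Pre_applyDiff2D; infer_instance

def pvWitness_applyDiff2D : List (List Int) × List (List Int) :=
  ([[1, 2], [3, 4]], [[5, 0, 0, 1, 1], [-2, 1, 1, 9, 9]])

def Spec_applyDiff2D (mat : List (List Int)) (opr : List (List Int)) (out : List (List Int)) : Prop := out = applyDiff2D_alt mat opr
instance (mat : List (List Int)) (opr : List (List Int)) (out : List (List Int)) : Decidable (Spec_applyDiff2D mat opr out) := by unfold Spec_applyDiff2D; infer_instance

-- ===== CLAIM (what is proved, stated in full; the proofs are below) =====
def Claim_equal_applyDiff2D : Prop := ∀ (mat : List (List Int)) (opr : List (List Int)), Dom_applyDiff2D mat opr → Pre_applyDiff2D mat opr → Spec_applyDiff2D mat opr (applyDiff2D mat opr)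

-- ===== LEMMAS AND PROOFS =====

-- cell d i j = d[i][j] with 0 outside; rlen d a = len(d[a])
def cell (d : List (List Int)) (i j : Nat) : Int := (d.getD i []).getD j 0
def rlen (d : List (List Int)) (a : Nat) : Nat := (d.getD a []).length

-- per-op bounds guaranteed by Pre_applyDiff2D
def opOK (nN mN : Nat) (op : List Int) : Prop :=
  op.length = 5 ∧
  -((nN : Int) + 2) ≤ op.getD 1 0 ∧ op.getD 1 0 ≤ (nN : Int) + 1 ∧
  -((mN : Int) + 2) ≤ op.getD 2 0 ∧ op.getD 2 0 ≤ (mN : Int) + 1 ∧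
  (op.getD 4 0 + 1 < (mN : Int) → -((mN : Int) + 2) ≤ op.getD 4 0 + 1) ∧
  (op.getD 3 0 + 1 < (nN : Int) → -((nN : Int) + 2) ≤ op.getD 3 0 + 1)

-- the wrapped (Nat) position a possibly-negative index denotes in a length-L list
def wrapNat (L : Nat) (k : Int) : Nat := (if k < 0 then k + (L : Int) else k).toNat

lemma getD_set' {α : Type} (l : List α) (j : Nat) (x d : α) (b : Nat) :
    (l.set j x).getD b d = if b = j ∧ j < l.length then x else l.getD b d := by
  simp only [List.getD_eq_getElem?_getD, List.getElem?_set]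
  by_cases hbj : b = j
  · subst hbj
    by_cases h : b < l.length <;> simp [h]
  · have hjb : j ≠ b := fun h => hbj h.symm
    simp [hjb, hbj]

lemma readC_cell (d : List (List Int)) (i j : Nat) : readC d (i : Int) (j : Int) = cell d i j := by
  simp [readC, cell, PySem.List.pyGet?_natCast, List.getD_eq_getElem?_getD]

lemma length_bump (d : List (List Int)) (i j v : Int) : (bump d i j v).length = d.length := by
  rcases h1 : PySem.List.pyGet? d i with _ | row
  · simp [bump, h1]
  · rcases h2 : PySem.List.pyGet? row j with _ | x
    · simp [bump, h1, h2]
    · simp [bump, h1, h2, PySem.List.length_pySetD]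

-- bump at a genuinely in-range (Nat) position is a List.set
lemma bump_eq_set (d : List (List Int)) (i j : Nat) (v : Int)
    (hi : i < d.length) (hj : j < rlen d i) :
    bump d (i : Int) (j : Int) v
      = d.set i ((d.getD i []).set j ((d.getD i []).getD j 0 + v)) := by
  set row := d.getD i [] with hrow
  have hj' : j < row.length := hj
  have h1 : PySem.List.pyGet? d (i : Int) = some row := by
    rw [PySem.List.pyGet?_natCast, hrow]
    simp [List.getD_eq_getElem?_getD, List.getElem?_eq_getElem hi]
  have h2 : PySem.List.pyGet? row (j : Int) = some (row.getD j 0) := by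
    rw [List.getD_eq_getElem?_getD, PySem.List.pyGet?_natCast, List.getElem?_eq_getElem hj']
    rfl
  simp only [bump, h1, h2, PySem.List.pySetD_natCast]

lemma rlen_bump (d : List (List Int)) (i j : Nat) (v : Int)
    (hi : i < d.length) (hj : j < rlen d i) (a : Nat) :
    rlen (bump d (i : Int) (j : Int) v) a = rlen d a := by
  rw [bump_eq_set d i j v hi hj]
  unfold rlen
  rw [getD_set']
  split
  · rename_i h
    rw [h.1, List.length_set]
  · rfl

lemma cell_bump (d : List (List Int)) (i j : Nat) (v : Int)
    (hi : i < d.length) (hj : j < rlen d i) (a b : Nat) :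
    cell (bump d (i : Int) (j : Int) v) a b = cell d a b + (if a = i ∧ b = j then v else 0) := by
  rw [bump_eq_set d i j v hi hj]
  unfold cell
  rw [getD_set']
  by_cases hai : a = i
  · subst hai
    rw [if_pos ⟨rfl, hi⟩, getD_set']
    by_cases hbj : b = j
    · subst hbj
      rw [if_pos ⟨rfl, (by simpa [rlen] using hj)⟩, if_pos ⟨rfl, rfl⟩]
    · rw [if_neg (fun h => hbj h.1), if_neg (fun h => hbj h.2), add_zero]
  · rw [if_neg (fun h => hai h.1), if_neg (fun h => hai h.1), add_zero]

-- A step 2: the four signed point updates of one op, at their wrapped positions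
def delta (nN mN : Nat) (op : List Int) (s t : Nat) : Int :=
  match op with
  | [v, r1, c1, r2, c2] =>
    (if s = wrapNat (nN + 2) r1 ∧ t = wrapNat (mN + 2) c1 then v else 0)
    + (if c2 + 1 < (mN : Int) ∧ s = wrapNat (nN + 2) r1 ∧ t = wrapNat (mN + 2) (c2 + 1) then -v else 0)
    + (if r2 + 1 < (nN : Int) ∧ s = wrapNat (nN + 2) (r2 + 1) ∧ t = wrapNat (mN + 2) c1 then -v else 0)
    + (if (r2 + 1 < (nN : Int) ∧ c2 + 1 < (mN : Int)) ∧ s = wrapNat (nN + 2) (r2 + 1) ∧ t = wrapNat (mN + 2) (c2 + 1) then v else 0)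
  | _ => 0

-- a bump at a possibly-negative position is a bump at the wrapped position
lemma bump_wrap (d : List (List Int)) (i j v : Int)
    (hi0 : -(d.length : Int) ≤ i) (hi1 : i < (d.length : Int))
    (hj0 : -((rlen d (wrapNat d.length i)) : Int) ≤ j)
    (hj1 : j < ((rlen d (wrapNat d.length i)) : Int)) :
    bump d i j v
      = bump d ((wrapNat d.length i : Nat) : Int) ((wrapNat (rlen d (wrapNat d.length i)) j : Nat) : Int) v := by
  set w := wrapNat d.length i with hwdef
  set row := d.getD w [] with hrowdef
  have hrowlen : row.length = rlen d w := by rw [hrowdef]; rfl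
  set wj := wrapNat (rlen d w) j with hwjdef
  have hw : w < d.length := by
    rw [hwdef]
    unfold wrapNat
    split_ifs <;> omega
  have hwj : wj < rlen d w := by
    rw [hwjdef]
    unfold wrapNat
    split_ifs <;> omega
  have hidx : PySem.List.pyIdx? d.length i = some w := by
    by_cases hneg : i < 0
    case neg =>
      have hpos : (0 : Int) ≤ i := by omega
      have hwv : w = i.toNat := by
        rw [hwdef]
        unfold wrapNat
        rw [if_neg (by omega : ¬ i < 0)]
      rw [hwv]
      unfold PySem.List.pyIdx?
      rw [if_pos hpos, if_pos (by omega : i < (d.length : Int))]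
    case pos =>
      have hwv : w = d.length - (-i).toNat := by
        rw [hwdef]
        unfold wrapNat
        rw [if_pos hneg]
        omega
      rw [hwv]
      unfold PySem.List.pyIdx?
      rw [if_neg (by omega : ¬ (0 : Int) ≤ i), if_pos (by omega : -(d.length : Int) ≤ i)]
  have hjdx : PySem.List.pyIdx? row.length j = some wj := by
    rw [hrowlen]
    by_cases hneg : j < 0
    case neg =>
      have hpos : (0 : Int) ≤ j := by omega
      have hwv : wj = j.toNat := by
        rw [hwjdef]
        unfold wrapNat
        rw [if_neg (by omega : ¬ j < 0)]
      rw [hwv]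
      unfold PySem.List.pyIdx?
      rw [if_pos hpos, if_pos (by omega : j < ((rlen d w : Nat) : Int))]
    case pos =>
      have hwv : wj = rlen d w - (-j).toNat := by
        rw [hwjdef]
        unfold wrapNat
        rw [if_pos hneg]
        omega
      rw [hwv]
      unfold PySem.List.pyIdx?
      rw [if_neg (by omega : ¬ (0 : Int) ≤ j), if_pos (by omega : -((rlen d w : Nat) : Int) ≤ j)]
  have hg1 : PySem.List.pyGet? d i = some row := by
    unfold PySem.List.pyGet?
    rw [hidx, Option.bind_some, hrowdef]
    simp [List.getD_eq_getElem?_getD, List.getElem?_eq_getElem hw]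
  have hwj' : wj < row.length := by rw [hrowlen]; exact hwj
  have hg2 : PySem.List.pyGet? row j = some (row.getD wj 0) := by
    unfold PySem.List.pyGet?
    rw [hjdx, Option.bind_some]
    rw [List.getD_eq_getElem?_getD, List.getElem?_eq_getElem hwj']
    rfl
  have hs1 : ∀ X : List Int, PySem.List.pySetD d i X = d.set w X := by
    intro X
    unfold PySem.List.pySetD PySem.List.pySet?
    rw [hidx, Option.map_some, Option.getD_some]
  have hs2 : ∀ x : Int, PySem.List.pySetD row j x = row.set wj x := by
    intro x
    unfold PySem.List.pySetD PySem.List.pySet?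
    rw [hjdx, Option.map_some, Option.getD_some]
  have hrhs := bump_eq_set d w wj v hw hwj
  rw [hrhs, ← hrowdef]
  simp only [bump, hg1, hg2, hs1, hs2]

-- one bump on the padded grid, pointwise
lemma bump_shape_cell (nN mN : Nat) (d : List (List Int))
    (hL : d.length = nN + 2) (hR : ∀ a, a < nN + 2 → rlen d a = mN + 2)
    (i j v : Int) (hi0 : -((nN : Int) + 2) ≤ i) (hi1 : i < (nN : Int) + 2)
    (hj0 : -((mN : Int) + 2) ≤ j) (hj1 : j < (mN : Int) + 2) :
    ((bump d i j v).length = d.length ∧ (∀ a, rlen (bump d i j v) a = rlen d a)) ∧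
    (∀ s t, cell (bump d i j v) s t =
      cell d s t + (if s = wrapNat (nN + 2) i ∧ t = wrapNat (mN + 2) j then v else 0)) := by
  have hwd : wrapNat d.length i = wrapNat (nN + 2) i := by rw [hL]
  have hw : wrapNat (nN + 2) i < nN + 2 := by
    simp only [wrapNat]
    split_ifs <;> omega
  have hrw : rlen d (wrapNat d.length i) = mN + 2 := by
    rw [hwd]
    exact hR _ hw
  have hwj : wrapNat (mN + 2) j < mN + 2 := by
    simp only [wrapNat]
    split_ifs <;> omega
  have heq : bump d i j v
      = bump d ((wrapNat (nN + 2) i : Nat) : Int) ((wrapNat (mN + 2) j : Nat) : Int) v := by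
    rw [bump_wrap d i j v (by omega) (by omega) (by rw [hrw]; push_cast; omega)
        (by rw [hrw]; push_cast; omega), hrw, hwd]
  have hw' : wrapNat (nN + 2) i < d.length := by omega
  have hwj' : wrapNat (mN + 2) j < rlen d (wrapNat (nN + 2) i) := by
    rw [hR _ hw]
    exact hwj
  rw [heq]
  exact ⟨⟨length_bump _ _ _ _, rlen_bump d _ _ v hw' hwj'⟩,
    fun s t => cell_bump d _ _ v hw' hwj' s t⟩

lemma diffOp_cell (nN mN : Nat) (op : List Int) (hop : opOK nN mN op)
    (d : List (List Int)) (hL : d.length = nN + 2) (hR : ∀ a, a < nN + 2 → rlen d a = mN + 2) :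
    ((diffOp (nN : Int) (mN : Int) d op).length = d.length ∧
     (∀ a, rlen (diffOp (nN : Int) (mN : Int) d op) a = rlen d a)) ∧
    (∀ s t, cell (diffOp (nN : Int) (mN : Int) d op) s t =
      cell d s t + delta nN mN op s t) := by
  obtain ⟨hlen5, hrest⟩ := hop
  rcases op with _ | ⟨v, op⟩; · simp at hlen5
  rcases op with _ | ⟨r1, op⟩; · simp at hlen5
  rcases op with _ | ⟨c1, op⟩; · simp at hlen5
  rcases op with _ | ⟨r2, op⟩; · simp at hlen5
  rcases op with _ | ⟨c2, op⟩; · simp at hlen5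
  rcases op with _ | ⟨x, op⟩; swap; · simp at hlen5
  simp only [List.getD_cons_succ, List.getD_cons_zero] at hrest
  obtain ⟨hr10, hr11, hc10, hc11, hc2g, hr2g⟩ := hrest
  -- step 1: unconditional bump at (r1, c1)
  obtain ⟨⟨S1len, S1rlen⟩, S1⟩ := bump_shape_cell nN mN d hL hR r1 c1 v
    (by omega) (by omega) (by omega) (by omega)
  set d1 := bump d r1 c1 v with hd1
  -- step 2: column guard
  set d2 := if c2 + 1 < (mN : Int) then bump d1 r1 (c2 + 1) (-v) else d1 with hd2
  have hL1 : d1.length = nN + 2 := by rw [S1len, hL]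
  have hR1 : ∀ a, a < nN + 2 → rlen d1 a = mN + 2 := fun a ha => by rw [S1rlen]; exact hR a ha
  have S2pack : (d2.length = d1.length ∧ (∀ a, rlen d2 a = rlen d1 a)) ∧
      (∀ s t, cell d2 s t = cell d1 s t +
        (if c2 + 1 < (mN : Int) ∧ s = wrapNat (nN + 2) r1 ∧ t = wrapNat (mN + 2) (c2 + 1) then -v else 0)) := by
    rw [hd2]
    by_cases hg : c2 + 1 < (mN : Int)
    · rw [if_pos hg]
      obtain ⟨⟨l2, r2'⟩, c2'⟩ := bump_shape_cell nN mN d1 hL1 hR1 r1 (c2 + 1) (-v)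
        (by omega) (by omega) (by omega) (by omega)
      refine ⟨⟨l2, r2'⟩, fun s t => ?_⟩
      rw [c2' s t]
      exact congrArg _ (if_congr (by tauto) rfl rfl)
    · rw [if_neg hg]
      exact ⟨⟨rfl, fun a => rfl⟩, fun s t => by rw [if_neg (fun h => hg h.1), add_zero]⟩
  obtain ⟨⟨S2len, S2rlen⟩, S2⟩ := S2pack
  have hL2 : d2.length = nN + 2 := by rw [S2len, hL1]
  have hR2 : ∀ a, a < nN + 2 → rlen d2 a = mN + 2 := fun a ha => by rw [S2rlen]; exact hR1 a ha
  -- step 3: row guard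
  set d3 := if r2 + 1 < (nN : Int) then bump d2 (r2 + 1) c1 (-v) else d2 with hd3
  have S3pack : (d3.length = d2.length ∧ (∀ a, rlen d3 a = rlen d2 a)) ∧
      (∀ s t, cell d3 s t = cell d2 s t +
        (if r2 + 1 < (nN : Int) ∧ s = wrapNat (nN + 2) (r2 + 1) ∧ t = wrapNat (mN + 2) c1 then -v else 0)) := by
    rw [hd3]
    by_cases hg : r2 + 1 < (nN : Int)
    · rw [if_pos hg]
      obtain ⟨⟨l3, r3'⟩, c3'⟩ := bump_shape_cell nN mN d2 hL2 hR2 (r2 + 1) c1 (-v)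
        (by omega) (by omega) (by omega) (by omega)
      refine ⟨⟨l3, r3'⟩, fun s t => ?_⟩
      rw [c3' s t]
      exact congrArg _ (if_congr (by tauto) rfl rfl)
    · rw [if_neg hg]
      exact ⟨⟨rfl, fun a => rfl⟩, fun s t => by rw [if_neg (fun h => hg h.1), add_zero]⟩
  obtain ⟨⟨S3len, S3rlen⟩, S3⟩ := S3pack
  have hL3 : d3.length = nN + 2 := by rw [S3len, hL2]
  have hR3 : ∀ a, a < nN + 2 → rlen d3 a = mN + 2 := fun a ha => by rw [S3rlen]; exact hR2 a ha
  -- step 4: corner guard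
  set d4 := if r2 + 1 < (nN : Int) ∧ c2 + 1 < (mN : Int) then bump d3 (r2 + 1) (c2 + 1) v else d3 with hd4
  have S4pack : (d4.length = d3.length ∧ (∀ a, rlen d4 a = rlen d3 a)) ∧
      (∀ s t, cell d4 s t = cell d3 s t +
        (if (r2 + 1 < (nN : Int) ∧ c2 + 1 < (mN : Int)) ∧ s = wrapNat (nN + 2) (r2 + 1) ∧ t = wrapNat (mN + 2) (c2 + 1) then v else 0)) := by
    rw [hd4]
    by_cases hg : r2 + 1 < (nN : Int) ∧ c2 + 1 < (mN : Int)
    · rw [if_pos hg]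
      obtain ⟨⟨l4, r4'⟩, c4'⟩ := bump_shape_cell nN mN d3 hL3 hR3 (r2 + 1) (c2 + 1) v
        (by omega) (by omega) (by omega) (by omega)
      refine ⟨⟨l4, r4'⟩, fun s t => ?_⟩
      rw [c4' s t]
      exact congrArg _ (if_congr (by tauto) rfl rfl)
    · rw [if_neg hg]
      exact ⟨⟨rfl, fun a => rfl⟩, fun s t => by rw [if_neg (fun h => hg h.1), add_zero]⟩
  obtain ⟨⟨S4len, S4rlen⟩, S4⟩ := S4pack
  have hrun : diffOp (nN : Int) (mN : Int) d [v, r1, c1, r2, c2] = d4 := by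
    rw [hd4, hd3, hd2, hd1, diffOp]
  refine ⟨⟨by rw [hrun, S4len, S3len, S2len, S1len], fun a => by rw [hrun, S4rlen, S3rlen, S2rlen, S1rlen]⟩, fun s t => ?_⟩
  rw [hrun, S4 s t, S3 s t, S2 s t, S1 s t]
  simp only [delta]
  ring

lemma diffFold_cell (nN mN : Nat) :
    ∀ (ops : List (List Int)) (d : List (List Int)), (∀ op ∈ ops, opOK nN mN op) →
    d.length = nN + 2 → (∀ a, a < nN + 2 → rlen d a = mN + 2) →
    ((ops.foldl (diffOp (nN : Int) (mN : Int)) d).length = nN + 2 ∧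
     (∀ a, a < nN + 2 → rlen (ops.foldl (diffOp (nN : Int) (mN : Int)) d) a = mN + 2)) ∧
    (∀ s t, cell (ops.foldl (diffOp (nN : Int) (mN : Int)) d) s t =
      cell d s t + (ops.map (fun op => delta nN mN op s t)).sum) := by
  intro ops
  induction ops with
  | nil => intro d _ hL hR; exact ⟨⟨hL, hR⟩, fun s t => by simp⟩
  | cons op ops ih =>
    intro d hok hL hR
    simp only [List.foldl_cons]
    obtain ⟨⟨hlen, hrlen⟩, hcell⟩ := diffOp_cell nN mN op (hok op (by simp)) d hL hR
    obtain ⟨⟨hlen2, hrlen2⟩, hcell2⟩ :=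
      ih (diffOp (nN : Int) (mN : Int) d op) (fun o ho => hok o (by simp [ho]))
        (by rw [hlen, hL]) (fun a ha => by rw [hrlen]; exact hR a ha)
    refine ⟨⟨hlen2, hrlen2⟩, fun s t => ?_⟩
    rw [hcell2 s t, hcell s t, List.map_cons, List.sum_cons]
    ring

-- A step 3 inner loop: running prefix along row i
lemma rowStep_cell :
    ∀ (k : Nat) (d : List (List Int)) (i : Nat), i < d.length → k ≤ rlen d i →
    (((PySem.List.pyRange 1 (k : Int) 1).foldl (fun d j => bump d (i : Int) j (readC d (i : Int) (j - 1))) d).length = d.length ∧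
     (∀ a, rlen ((PySem.List.pyRange 1 (k : Int) 1).foldl (fun d j => bump d (i : Int) j (readC d (i : Int) (j - 1))) d) a = rlen d a)) ∧
    (∀ a b, cell ((PySem.List.pyRange 1 (k : Int) 1).foldl (fun d j => bump d (i : Int) j (readC d (i : Int) (j - 1))) d) a b =
      if a = i ∧ b < k then ∑ t ∈ Finset.range (b + 1), cell d i t else cell d a b) := by
  intro k
  induction k with
  | zero =>
    intro d i hi hk
    rw [PySem.List.pyRange_one_eq_nil (by omega), List.foldl_nil]
    exact ⟨⟨rfl, fun a => rfl⟩, fun a b => by rw [if_neg (by rintro ⟨_, h⟩; omega)]⟩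
  | succ k ih =>
    intro d i hi hk
    by_cases hk1 : 1 ≤ k
    · have hcast : ((k + 1 : Nat) : Int) = (k : Int) + 1 := by push_cast; ring
      rw [hcast, PySem.List.pyRange_one_succ_right (by omega : (1 : Int) ≤ (k : Int))]
      simp only [List.foldl_append, List.foldl_cons, List.foldl_nil]
      obtain ⟨⟨hlen, hrlen⟩, hcell⟩ := ih d i hi (by omega)
      have hjk : k < rlen ((PySem.List.pyRange 1 (k : Int) 1).foldl (fun d j => bump d (i : Int) j (readC d (i : Int) (j - 1))) d) i := by
        rw [hrlen]; omega
      have hiF : i < ((PySem.List.pyRange 1 (k : Int) 1).foldl (fun d j => bump d (i : Int) j (readC d (i : Int) (j - 1))) d).length := by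
        rw [hlen]; exact hi
      have hread : ((k : Int) - 1) = (((k - 1 : Nat)) : Int) := by omega
      refine ⟨⟨by rw [length_bump, hlen], fun a => by rw [rlen_bump _ i k _ hiF hjk, hrlen]⟩, ?_⟩
      have hmid : cell ((PySem.List.pyRange 1 (k : Int) 1).foldl (fun d j => bump d (i : Int) j (readC d (i : Int) (j - 1))) d) i (k - 1)
          = ∑ t ∈ Finset.range k, cell d i t := by
        rw [hcell i (k - 1), if_pos ⟨rfl, by omega⟩, Nat.sub_add_cancel hk1]
      intro a b
      rw [hread, readC_cell, cell_bump _ i k _ hiF hjk a b, hmid, hcell a b]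
      by_cases hai : a = i
      · subst hai
        by_cases hbk : b = k
        · subst hbk
          rw [if_neg (by omega), if_pos ⟨rfl, rfl⟩, if_pos ⟨rfl, by omega⟩, Finset.sum_range_succ]
          ring
        · by_cases hblt : b < k
          · rw [if_pos ⟨rfl, hblt⟩, if_neg (fun h => hbk h.2), if_pos ⟨rfl, by omega⟩, add_zero]
          · rw [if_neg (by omega), if_neg (fun h => hbk h.2), if_neg (by omega), add_zero]
      · rw [if_neg (fun h => hai h.1), if_neg (fun h => hai h.1), if_neg (fun h => hai h.1), add_zero]
    · have hk0 : k = 0 := by omega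
      subst hk0
      rw [PySem.List.pyRange_one_eq_nil (by omega), List.foldl_nil]
      refine ⟨⟨rfl, fun a => rfl⟩, fun a b => ?_⟩
      by_cases h : a = i ∧ b < 1
      · obtain ⟨rfl, hb⟩ := h
        have hb0 : b = 0 := by omega
        subst hb0
        rw [if_pos ⟨rfl, by omega⟩, Finset.sum_range_one]
      · rw [if_neg h]

-- A step 3 outer loop
lemma rowPass_cell (mN : Nat) :
    ∀ (K : Nat) (d : List (List Int)), K ≤ d.length → (∀ a, a < d.length → mN ≤ rlen d a) →
    (((PySem.List.pyRange 0 (K : Int) 1).foldl (rowStep (mN : Int)) d).length = d.length ∧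
     (∀ a, rlen ((PySem.List.pyRange 0 (K : Int) 1).foldl (rowStep (mN : Int)) d) a = rlen d a)) ∧
    (∀ a b, cell ((PySem.List.pyRange 0 (K : Int) 1).foldl (rowStep (mN : Int)) d) a b =
      if a < K ∧ b < mN then ∑ t ∈ Finset.range (b + 1), cell d a t else cell d a b) := by
  intro K
  induction K with
  | zero =>
    intro d hK hm
    rw [show ((0 : Nat) : Int) = 0 by simp, PySem.List.pyRange_one_eq_nil (by omega), List.foldl_nil]
    exact ⟨⟨rfl, fun a => rfl⟩, fun a b => by rw [if_neg (by rintro ⟨h, _⟩; omega)]⟩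
  | succ K ih =>
    intro d hK hm
    have hcast : ((K + 1 : Nat) : Int) = (K : Int) + 1 := by push_cast; ring
    rw [hcast, PySem.List.pyRange_one_succ_right (by omega : (0 : Int) ≤ (K : Int))]
    simp only [List.foldl_append, List.foldl_cons, List.foldl_nil, rowStep]
    obtain ⟨⟨hlen, hrlen⟩, hcell⟩ := ih d (by omega) hm
    obtain ⟨⟨hlen2, hrlen2⟩, hcell2⟩ :=
      rowStep_cell mN ((PySem.List.pyRange 0 (K : Int) 1).foldl (rowStep (mN : Int)) d) K
        (by rw [hlen]; omega) (by rw [hrlen]; exact hm K (by omega))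
    refine ⟨⟨by rw [hlen2, hlen], fun a => by rw [hrlen2, hrlen]⟩, ?_⟩
    intro a b
    rw [hcell2 a b]
    by_cases haK : a = K
    · subst haK
      by_cases hb : b < mN
      · rw [if_pos ⟨rfl, hb⟩, if_pos ⟨by omega, hb⟩]
        refine Finset.sum_congr rfl fun t _ => ?_
        rw [hcell a t, if_neg (by rintro ⟨h, _⟩; omega)]
      · rw [if_neg (fun h => hb h.2), hcell a b, if_neg (fun h => hb h.2), if_neg (fun h => hb h.2)]
    · rw [if_neg (fun h => haK h.1), hcell a b]
      split_ifs <;> first | rfl | omega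

-- A step 4 inner loop: running prefix down column j
lemma colStep_cell (j : Nat) :
    ∀ (k : Nat) (d : List (List Int)), k ≤ d.length → (∀ a, a < d.length → j < rlen d a) →
    (((PySem.List.pyRange 1 (k : Int) 1).foldl (fun d i => bump d i (j : Int) (readC d (i - 1) (j : Int))) d).length = d.length ∧
     (∀ a, rlen ((PySem.List.pyRange 1 (k : Int) 1).foldl (fun d i => bump d i (j : Int) (readC d (i - 1) (j : Int))) d) a = rlen d a)) ∧
    (∀ a b, cell ((PySem.List.pyRange 1 (k : Int) 1).foldl (fun d i => bump d i (j : Int) (readC d (i - 1) (j : Int))) d) a b =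
      if b = j ∧ a < k then ∑ s ∈ Finset.range (a + 1), cell d s j else cell d a b) := by
  intro k
  induction k with
  | zero =>
    intro d hk hj
    rw [PySem.List.pyRange_one_eq_nil (by omega), List.foldl_nil]
    exact ⟨⟨rfl, fun a => rfl⟩, fun a b => by rw [if_neg (by rintro ⟨_, h⟩; omega)]⟩
  | succ k ih =>
    intro d hk hj
    by_cases hk1 : 1 ≤ k
    · have hcast : ((k + 1 : Nat) : Int) = (k : Int) + 1 := by push_cast; ring
      rw [hcast, PySem.List.pyRange_one_succ_right (by omega : (1 : Int) ≤ (k : Int))]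
      simp only [List.foldl_append, List.foldl_cons, List.foldl_nil]
      obtain ⟨⟨hlen, hrlen⟩, hcell⟩ := ih d (by omega) hj
      have hkF : k < ((PySem.List.pyRange 1 (k : Int) 1).foldl (fun d i => bump d i (j : Int) (readC d (i - 1) (j : Int))) d).length := by
        rw [hlen]; omega
      have hjF : j < rlen ((PySem.List.pyRange 1 (k : Int) 1).foldl (fun d i => bump d i (j : Int) (readC d (i - 1) (j : Int))) d) k := by
        rw [hrlen]; exact hj k (by omega)
      have hread : ((k : Int) - 1) = (((k - 1 : Nat)) : Int) := by omega
      refine ⟨⟨by rw [length_bump, hlen], fun a => by rw [rlen_bump _ k j _ hkF hjF, hrlen]⟩, ?_⟩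
      have hmid : cell ((PySem.List.pyRange 1 (k : Int) 1).foldl (fun d i => bump d i (j : Int) (readC d (i - 1) (j : Int))) d) (k - 1) j
          = ∑ s ∈ Finset.range k, cell d s j := by
        rw [hcell (k - 1) j, if_pos ⟨rfl, by omega⟩, Nat.sub_add_cancel hk1]
      intro a b
      rw [hread, readC_cell, cell_bump _ k j _ hkF hjF a b, hmid, hcell a b]
      by_cases hbj : b = j
      · subst hbj
        by_cases hak : a = k
        · subst hak
          rw [if_neg (by omega), if_pos ⟨rfl, rfl⟩, if_pos ⟨rfl, by omega⟩, Finset.sum_range_succ]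
          ring
        · by_cases halt : a < k
          · rw [if_pos ⟨rfl, halt⟩, if_neg (fun h => hak h.1), if_pos ⟨rfl, by omega⟩, add_zero]
          · rw [if_neg (by omega), if_neg (fun h => hak h.1), if_neg (by omega), add_zero]
      · rw [if_neg (fun h => hbj h.1), if_neg (fun h => hbj h.2), if_neg (fun h => hbj h.1), add_zero]
    · have hk0 : k = 0 := by omega
      subst hk0
      rw [PySem.List.pyRange_one_eq_nil (by omega), List.foldl_nil]
      refine ⟨⟨rfl, fun a => rfl⟩, fun a b => ?_⟩
      by_cases h : b = j ∧ a < 1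
      · obtain ⟨rfl, ha⟩ := h
        have ha0 : a = 0 := by omega
        subst ha0
        rw [if_pos ⟨rfl, by omega⟩, Finset.sum_range_one]
      · rw [if_neg h]

-- A step 4 outer loop
lemma colPass_cell (nN : Nat) :
    ∀ (M : Nat) (d : List (List Int)), nN ≤ d.length → (∀ a, a < d.length → M ≤ rlen d a) →
    (((PySem.List.pyRange 0 (M : Int) 1).foldl (colStep (nN : Int)) d).length = d.length ∧
     (∀ a, rlen ((PySem.List.pyRange 0 (M : Int) 1).foldl (colStep (nN : Int)) d) a = rlen d a)) ∧
    (∀ a b, cell ((PySem.List.pyRange 0 (M : Int) 1).foldl (colStep (nN : Int)) d) a b =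
      if b < M ∧ a < nN then ∑ s ∈ Finset.range (a + 1), cell d s b else cell d a b) := by
  intro M
  induction M with
  | zero =>
    intro d hn hm
    rw [show ((0 : Nat) : Int) = 0 by simp, PySem.List.pyRange_one_eq_nil (by omega), List.foldl_nil]
    exact ⟨⟨rfl, fun a => rfl⟩, fun a b => by rw [if_neg (by rintro ⟨h, _⟩; omega)]⟩
  | succ M ih =>
    intro d hn hm
    have hcast : ((M + 1 : Nat) : Int) = (M : Int) + 1 := by push_cast; ring
    rw [hcast, PySem.List.pyRange_one_succ_right (by omega : (0 : Int) ≤ (M : Int))]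
    simp only [List.foldl_append, List.foldl_cons, List.foldl_nil, colStep]
    obtain ⟨⟨hlen, hrlen⟩, hcell⟩ := ih d hn (fun a ha => by have := hm a ha; omega)
    obtain ⟨⟨hlen2, hrlen2⟩, hcell2⟩ :=
      colStep_cell M nN ((PySem.List.pyRange 0 (M : Int) 1).foldl (colStep (nN : Int)) d)
        (by rw [hlen]; omega) (fun a ha => by rw [hrlen]; have := hm a (by rwa [hlen] at ha); omega)
    refine ⟨⟨by rw [hlen2, hlen], fun a => by rw [hrlen2, hrlen]⟩, ?_⟩
    intro a b
    rw [hcell2 a b]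
    by_cases hbM : b = M
    · subst hbM
      by_cases ha : a < nN
      · rw [if_pos ⟨rfl, ha⟩, if_pos ⟨by omega, ha⟩]
        refine Finset.sum_congr rfl fun t _ => ?_
        rw [hcell t b, if_neg (by rintro ⟨h, _⟩; omega)]
      · rw [if_neg (fun h => ha h.2), hcell a b, if_neg (fun h => ha h.2), if_neg (fun h => ha h.2)]
    · rw [if_neg (fun h => hbM h.1), hcell a b]
      split_ifs <;> first | rfl | omega

-- pad facts
lemma pad_length (nN mN : Nat) : (pad nN mN).length = nN + 2 := by
  simp [pad]
lemma pad_rlen (nN mN : Nat) (a : Nat) (h : a < nN + 2) : rlen (pad nN mN) a = mN + 2 := by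
  simp [pad, rlen, List.getD_eq_getElem?_getD, h]
lemma pad_cell (nN mN : Nat) (s t : Nat) : cell (pad nN mN) s t = 0 := by
  unfold pad cell
  rcases Nat.lt_or_ge s (nN + 2) with h | h
  · by_cases ht : t < mN + 2 <;>
      simp [List.getD_eq_getElem?_getD, h, ht]
  · simp [List.getD_eq_getElem?_getD, Nat.not_lt.mpr h]


-- B step 1: the four unconditional clamped point updates of one op
def deltaB (nN mN : Nat) (op : List Int) (s t : Nat) : Int :=
  match op with
  | [v, r1, c1, r2, c2] =>
    (if s = wrapNat (nN + 2) r1 ∧ t = wrapNat (mN + 2) c1 then v else 0)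
    + (if s = wrapNat (nN + 2) r1 ∧ t = wrapNat (mN + 2) (min (c2 + 1) (mN : Int)) then -v else 0)
    + (if s = wrapNat (nN + 2) (min (r2 + 1) (nN : Int)) ∧ t = wrapNat (mN + 2) c1 then -v else 0)
    + (if s = wrapNat (nN + 2) (min (r2 + 1) (nN : Int)) ∧ t = wrapNat (mN + 2) (min (c2 + 1) (mN : Int)) then v else 0)
  | _ => 0

lemma diffOpB_cell (nN mN : Nat) (op : List Int) (hop : opOK nN mN op)
    (d : List (List Int)) (hL : d.length = nN + 2) (hR : ∀ a, a < nN + 2 → rlen d a = mN + 2) :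
    ((diffOpB (nN : Int) (mN : Int) d op).length = d.length ∧
     (∀ a, rlen (diffOpB (nN : Int) (mN : Int) d op) a = rlen d a)) ∧
    (∀ s t, cell (diffOpB (nN : Int) (mN : Int) d op) s t =
      cell d s t + deltaB nN mN op s t) := by
  obtain ⟨hlen5, hrest⟩ := hop
  rcases op with _ | ⟨v, op⟩; · simp at hlen5
  rcases op with _ | ⟨r1, op⟩; · simp at hlen5
  rcases op with _ | ⟨c1, op⟩; · simp at hlen5
  rcases op with _ | ⟨r2, op⟩; · simp at hlen5
  rcases op with _ | ⟨c2, op⟩; · simp at hlen5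
  rcases op with _ | ⟨x, op⟩; swap; · simp at hlen5
  simp only [List.getD_cons_succ, List.getD_cons_zero] at hrest
  obtain ⟨hr10, hr11, hc10, hc11, hc2g, hr2g⟩ := hrest
  have hcb : -((mN : Int) + 2) ≤ min (c2 + 1) (mN : Int) ∧ min (c2 + 1) (mN : Int) < (mN : Int) + 2 := by
    by_cases hg : c2 + 1 < (mN : Int)
    · have := hc2g hg
      constructor <;> omega
    · constructor <;> omega
  have hrb : -((nN : Int) + 2) ≤ min (r2 + 1) (nN : Int) ∧ min (r2 + 1) (nN : Int) < (nN : Int) + 2 := by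
    by_cases hg : r2 + 1 < (nN : Int)
    · have := hr2g hg
      constructor <;> omega
    · constructor <;> omega
  obtain ⟨⟨S1len, S1rlen⟩, S1⟩ := bump_shape_cell nN mN d hL hR r1 c1 v
    (by omega) (by omega) (by omega) (by omega)
  set d1 := bump d r1 c1 v with hd1
  have hL1 : d1.length = nN + 2 := by rw [S1len, hL]
  have hR1 : ∀ a, a < nN + 2 → rlen d1 a = mN + 2 := fun a ha => by rw [S1rlen]; exact hR a ha
  obtain ⟨⟨S2len, S2rlen⟩, S2⟩ := bump_shape_cell nN mN d1 hL1 hR1 r1 (min (c2 + 1) (mN : Int)) (-v)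
    (by omega) (by omega) (by exact hcb.1) (by exact hcb.2)
  set d2 := bump d1 r1 (min (c2 + 1) (mN : Int)) (-v) with hd2
  have hL2 : d2.length = nN + 2 := by rw [S2len, hL1]
  have hR2 : ∀ a, a < nN + 2 → rlen d2 a = mN + 2 := fun a ha => by rw [S2rlen]; exact hR1 a ha
  obtain ⟨⟨S3len, S3rlen⟩, S3⟩ := bump_shape_cell nN mN d2 hL2 hR2 (min (r2 + 1) (nN : Int)) c1 (-v)
    (by exact hrb.1) (by exact hrb.2) (by omega) (by omega)
  set d3 := bump d2 (min (r2 + 1) (nN : Int)) c1 (-v) with hd3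
  have hL3 : d3.length = nN + 2 := by rw [S3len, hL2]
  have hR3 : ∀ a, a < nN + 2 → rlen d3 a = mN + 2 := fun a ha => by rw [S3rlen]; exact hR2 a ha
  obtain ⟨⟨S4len, S4rlen⟩, S4⟩ := bump_shape_cell nN mN d3 hL3 hR3 (min (r2 + 1) (nN : Int)) (min (c2 + 1) (mN : Int)) v
    (by exact hrb.1) (by exact hrb.2) (by exact hcb.1) (by exact hcb.2)
  have hrun : diffOpB (nN : Int) (mN : Int) d [v, r1, c1, r2, c2]
      = bump d3 (min (r2 + 1) (nN : Int)) (min (c2 + 1) (mN : Int)) v := by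
    rw [hd3, hd2, hd1, diffOpB]
  refine ⟨⟨by rw [hrun, S4len, S3len, S2len, S1len], fun a => by rw [hrun, S4rlen, S3rlen, S2rlen, S1rlen]⟩, fun s t => ?_⟩
  rw [hrun, S4 s t, S3 s t, S2 s t, S1 s t]
  simp only [deltaB]
  ring

lemma diffFoldB_cell (nN mN : Nat) :
    ∀ (ops : List (List Int)) (d : List (List Int)), (∀ op ∈ ops, opOK nN mN op) →
    d.length = nN + 2 → (∀ a, a < nN + 2 → rlen d a = mN + 2) →
    ((ops.foldl (diffOpB (nN : Int) (mN : Int)) d).length = nN + 2 ∧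
     (∀ a, a < nN + 2 → rlen (ops.foldl (diffOpB (nN : Int) (mN : Int)) d) a = mN + 2)) ∧
    (∀ s t, cell (ops.foldl (diffOpB (nN : Int) (mN : Int)) d) s t =
      cell d s t + (ops.map (fun op => deltaB nN mN op s t)).sum) := by
  intro ops
  induction ops with
  | nil => intro d _ hL hR; exact ⟨⟨hL, hR⟩, fun s t => by simp⟩
  | cons op ops ih =>
    intro d hok hL hR
    simp only [List.foldl_cons]
    obtain ⟨⟨hlen, hrlen⟩, hcell⟩ := diffOpB_cell nN mN op (hok op (by simp)) d hL hR
    obtain ⟨⟨hlen2, hrlen2⟩, hcell2⟩ :=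
      ih (diffOpB (nN : Int) (mN : Int) d op) (fun o ho => hok o (by simp [ho]))
        (by rw [hlen, hL]) (fun a ha => by rw [hrlen]; exact hR a ha)
    refine ⟨⟨hlen2, hrlen2⟩, fun s t => ?_⟩
    rw [hcell2 s t, hcell s t, List.map_cons, List.sum_cons]
    ring

-- on the visible cells the clamped corners coincide with A's guarded corners
lemma deltaB_eq_delta (nN mN : Nat) (op : List Int) (hop : opOK nN mN op)
    (s t : Nat) (hs : s < nN) (ht : t < mN) :
    deltaB nN mN op s t = delta nN mN op s t := by
  obtain ⟨hlen5, hrest⟩ := hop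
  rcases op with _ | ⟨v, op⟩; · simp at hlen5
  rcases op with _ | ⟨r1, op⟩; · simp at hlen5
  rcases op with _ | ⟨c1, op⟩; · simp at hlen5
  rcases op with _ | ⟨r2, op⟩; · simp at hlen5
  rcases op with _ | ⟨c2, op⟩; · simp at hlen5
  rcases op with _ | ⟨x, op⟩; swap; · simp at hlen5
  simp only [List.getD_cons_succ, List.getD_cons_zero] at hrest
  obtain ⟨hr10, hr11, hc10, hc11, hc2g, hr2g⟩ := hrest
  have ec : (t = wrapNat (mN + 2) (min (c2 + 1) (mN : Int))) ↔
      (c2 + 1 < (mN : Int) ∧ t = wrapNat (mN + 2) (c2 + 1)) := by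
    unfold wrapNat
    split_ifs <;> omega
  have er : (s = wrapNat (nN + 2) (min (r2 + 1) (nN : Int))) ↔
      (r2 + 1 < (nN : Int) ∧ s = wrapNat (nN + 2) (r2 + 1)) := by
    unfold wrapNat
    split_ifs <;> omega
  simp only [deltaB, delta]
  rw [if_congr (show (s = wrapNat (nN + 2) r1 ∧ t = wrapNat (mN + 2) (min (c2 + 1) (mN : Int))) ↔
        (c2 + 1 < (mN : Int) ∧ s = wrapNat (nN + 2) r1 ∧ t = wrapNat (mN + 2) (c2 + 1)) from
      ⟨fun h => ⟨(ec.mp h.2).1, h.1, (ec.mp h.2).2⟩,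
       fun h => ⟨h.2.1, ec.mpr ⟨h.1, h.2.2⟩⟩⟩) rfl rfl,
    if_congr (show (s = wrapNat (nN + 2) (min (r2 + 1) (nN : Int)) ∧ t = wrapNat (mN + 2) c1) ↔
        (r2 + 1 < (nN : Int) ∧ s = wrapNat (nN + 2) (r2 + 1) ∧ t = wrapNat (mN + 2) c1) from
      ⟨fun h => ⟨(er.mp h.1).1, (er.mp h.1).2, h.2⟩,
       fun h => ⟨er.mpr ⟨h.1, h.2.1⟩, h.2.2⟩⟩) rfl rfl,
    if_congr (show (s = wrapNat (nN + 2) (min (r2 + 1) (nN : Int)) ∧ t = wrapNat (mN + 2) (min (c2 + 1) (mN : Int))) ↔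
        ((r2 + 1 < (nN : Int) ∧ c2 + 1 < (mN : Int)) ∧ s = wrapNat (nN + 2) (r2 + 1) ∧ t = wrapNat (mN + 2) (c2 + 1)) from
      ⟨fun h => ⟨⟨(er.mp h.1).1, (ec.mp h.2).1⟩, (er.mp h.1).2, (ec.mp h.2).2⟩,
       fun h => ⟨er.mpr ⟨h.1.1, h.2.1⟩, ec.mpr ⟨h.1.2, h.2.2⟩⟩⟩) rfl rfl]

lemma readV_getD (l : List Int) (j : Nat) : readV l (j : Nat) = l.getD j 0 := by
  rw [readV, PySem.List.pyGet?_natCast, List.getD_eq_getElem?_getD]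

-- B fused pass, inner loop over one row
lemma fuseCell_pass (dB : List (List Int)) (iN mN : Nat) :
    ∀ (J : Nat) (col : List Int) (run : Int) (res : List (List Int)),
    J ≤ mN → col.length = mN → iN < res.length → rlen res iN = mN →
    ((((PySem.List.pyRange 0 (J : Int) 1).foldl (fuseCell dB (iN : Int)) (col, run, res)).1.length = mN ∧
      (((PySem.List.pyRange 0 (J : Int) 1).foldl (fuseCell dB (iN : Int)) (col, run, res)).2.2.length = res.length ∧
       (∀ a, rlen (((PySem.List.pyRange 0 (J : Int) 1).foldl (fuseCell dB (iN : Int)) (col, run, res)).2.2) a = rlen res a))) ∧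
     (∀ t, (((PySem.List.pyRange 0 (J : Int) 1).foldl (fuseCell dB (iN : Int)) (col, run, res)).1).getD t 0
        = col.getD t 0 + (if t < J then cell dB iN t else 0)) ∧
     (((PySem.List.pyRange 0 (J : Int) 1).foldl (fuseCell dB (iN : Int)) (col, run, res)).2.1
        = run + ∑ t ∈ Finset.range J, (col.getD t 0 + cell dB iN t)) ∧
     (∀ a b, cell (((PySem.List.pyRange 0 (J : Int) 1).foldl (fuseCell dB (iN : Int)) (col, run, res)).2.2) a b
        = cell res a b + (if a = iN ∧ b < J then
            run + ∑ t ∈ Finset.range (b + 1), (col.getD t 0 + cell dB iN t) else 0))) := by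
  intro J
  induction J with
  | zero =>
    intro col run res hJ hcol hi hri
    rw [show ((0 : Nat) : Int) = 0 by simp, PySem.List.pyRange_one_eq_nil (by omega), List.foldl_nil]
    refine ⟨⟨hcol, rfl, fun a => rfl⟩, fun t => by simp, by simp, fun a b => by
      rw [if_neg (by rintro ⟨_, h⟩; omega)]
      simp⟩
  | succ J ih =>
    intro col run res hJ hcol hi hri
    have hcast : ((J + 1 : Nat) : Int) = (J : Int) + 1 := by push_cast; ring
    rw [hcast, PySem.List.pyRange_one_succ_right (by omega : (0 : Int) ≤ (J : Int))]
    simp only [List.foldl_append, List.foldl_cons, List.foldl_nil]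
    obtain ⟨⟨hclen, hrlen, hrrlen⟩, hcolD, hrun, hcell⟩ := ih col run res (by omega) hcol hi hri
    set st := (PySem.List.pyRange 0 (J : Int) 1).foldl (fuseCell dB (iN : Int)) (col, run, res) with hst
    have hx : readV st.1 (J : Int) + readC dB (iN : Int) (J : Int)
        = col.getD J 0 + cell dB iN J := by
      rw [show ((J : Nat) : Int) = ((J : Nat) : Int) from rfl, readV_getD st.1 J, readC_cell,
        hcolD J, if_neg (by omega), add_zero]
    have hset : PySem.List.pySetD st.1 ((J : Nat) : Int) (col.getD J 0 + cell dB iN J)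
        = st.1.set J (col.getD J 0 + cell dB iN J) := PySem.List.pySetD_natCast _ _ _
    have hiF : iN < st.2.2.length := by rw [hrlen]; exact hi
    have hjF : J < rlen st.2.2 iN := by rw [hrrlen]; omega
    have hrunJ : st.2.1 + (col.getD J 0 + cell dB iN J)
        = run + ∑ t ∈ Finset.range (J + 1), (col.getD t 0 + cell dB iN t) := by
      rw [hrun, Finset.sum_range_succ]
      ring
    refine ⟨⟨?_, ?_, ?_⟩, ?_, ?_, ?_⟩
    · simp only [fuseCell, hx, hset]
      rw [List.length_set, hclen]
    · simp only [fuseCell, hx]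
      rw [length_bump, hrlen]
    · intro a
      simp only [fuseCell, hx]
      rw [rlen_bump st.2.2 iN J _ hiF hjF, hrrlen]
    · intro t
      simp only [fuseCell, hx, hset]
      rw [getD_set']
      by_cases htJ : t = J
      · subst htJ
        rw [if_pos ⟨rfl, by rw [hclen]; omega⟩, if_pos (by omega)]
      · rw [if_neg (fun h => htJ h.1), hcolD t]
        have : (t < J) ↔ (t < J + 1) := by omega
        rw [if_congr this rfl rfl]
    · simp only [fuseCell, hx]
      exact hrunJ
    · intro a b
      simp only [fuseCell, hx]
      rw [cell_bump st.2.2 iN J _ hiF hjF a b, hcell a b, hrunJ]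
      by_cases hai : a = iN
      · subst hai
        by_cases hbJ : b = J
        · subst hbJ
          rw [if_neg (by omega), if_pos ⟨rfl, rfl⟩, if_pos ⟨rfl, by omega⟩]
          ring
        · by_cases hbl : b < J
          · rw [if_pos ⟨rfl, hbl⟩, if_neg (fun h => hbJ h.2), if_pos ⟨rfl, by omega⟩, add_zero]
          · rw [if_neg (by omega), if_neg (fun h => hbJ h.2), if_neg (by omega), add_zero]
      · rw [if_neg (fun h => hai h.1), if_neg (fun h => hai h.1), if_neg (fun h => hai h.1), add_zero]

-- B fused pass, outer loop over the rows
lemma fuseRow_pass (dB : List (List Int)) (mN : Nat) :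
    ∀ (K : Nat) (col : List Int) (res : List (List Int)),
    col.length = mN → K ≤ res.length → (∀ a, a < res.length → rlen res a = mN) →
    ((((PySem.List.pyRange 0 (K : Int) 1).foldl (fuseRow dB (mN : Int)) (col, res)).1.length = mN ∧
      (((PySem.List.pyRange 0 (K : Int) 1).foldl (fuseRow dB (mN : Int)) (col, res)).2.length = res.length ∧
       (∀ a, rlen (((PySem.List.pyRange 0 (K : Int) 1).foldl (fuseRow dB (mN : Int)) (col, res)).2) a = rlen res a))) ∧
     (∀ t, (((PySem.List.pyRange 0 (K : Int) 1).foldl (fuseRow dB (mN : Int)) (col, res)).1).getD t 0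
        = col.getD t 0 + (if t < mN then ∑ s ∈ Finset.range K, cell dB s t else 0)) ∧
     (∀ a b, b < mN → cell (((PySem.List.pyRange 0 (K : Int) 1).foldl (fuseRow dB (mN : Int)) (col, res)).2) a b
        = cell res a b + (if a < K then
            (∑ t ∈ Finset.range (b + 1), col.getD t 0)
              + ∑ s ∈ Finset.range (a + 1), ∑ t ∈ Finset.range (b + 1), cell dB s t else 0))) := by
  intro K
  induction K with
  | zero =>
    intro col res hcol hK hres
    rw [show ((0 : Nat) : Int) = 0 by simp, PySem.List.pyRange_one_eq_nil (by omega), List.foldl_nil]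
    exact ⟨⟨hcol, rfl, fun a => rfl⟩, fun t => by simp, fun a b _ => by
      rw [if_neg (by omega)]
      simp⟩
  | succ K ih =>
    intro col res hcol hK hres
    have hcast : ((K + 1 : Nat) : Int) = (K : Int) + 1 := by push_cast; ring
    rw [hcast, PySem.List.pyRange_one_succ_right (by omega : (0 : Int) ≤ (K : Int))]
    simp only [List.foldl_append, List.foldl_cons, List.foldl_nil]
    obtain ⟨⟨hclen, hrlen, hrrlen⟩, hcolD, hcell⟩ := ih col res hcol (by omega) hres
    set st := (PySem.List.pyRange 0 (K : Int) 1).foldl (fuseRow dB (mN : Int)) (col, res) with hst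
    have hKlen : K < st.2.length := by rw [hrlen]; omega
    have hKr : rlen st.2 K = mN := by rw [hrrlen]; exact hres K (by omega)
    obtain ⟨⟨iclen, irlen, irrlen⟩, icolD, irun, icell⟩ :=
      fuseCell_pass dB K mN mN st.1 0 st.2 le_rfl hclen hKlen hKr
    refine ⟨⟨?_, ?_, ?_⟩, ?_, ?_⟩
    · simp only [fuseRow]
      exact iclen
    · simp only [fuseRow]
      rw [irlen, hrlen]
    · intro a
      simp only [fuseRow]
      rw [irrlen a, hrrlen a]
    · intro t
      simp only [fuseRow]
      rw [icolD t, hcolD t]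
      by_cases ht : t < mN
      · rw [if_pos ht, if_pos ht, if_pos ht, Finset.sum_range_succ]
        ring
      · rw [if_neg ht, if_neg ht, if_neg (by omega), add_zero, add_zero]
    · intro a b hb
      simp only [fuseRow]
      rw [icell a b, hcell a b hb]
      by_cases haK : a = K
      · subst haK
        rw [if_neg (by omega), add_zero, if_pos ⟨rfl, by omega⟩, if_pos (by omega)]
        have hsum : (∑ t ∈ Finset.range (b + 1), (st.1.getD t 0 + cell dB a t))
            = (∑ t ∈ Finset.range (b + 1), col.getD t 0)
              + ((∑ t ∈ Finset.range (b + 1), (∑ s ∈ Finset.range a, cell dB s t))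
              + ∑ t ∈ Finset.range (b + 1), cell dB a t) := by
          rw [← Finset.sum_add_distrib, ← Finset.sum_add_distrib]
          refine Finset.sum_congr rfl fun t htm => ?_
          rw [hcolD t, if_pos (by simp at htm; omega)]
          ring
        rw [hsum]
        have hswap : (∑ s ∈ Finset.range (a + 1), ∑ t ∈ Finset.range (b + 1), cell dB s t)
            = (∑ t ∈ Finset.range (b + 1), (∑ s ∈ Finset.range a, cell dB s t))
              + ∑ t ∈ Finset.range (b + 1), cell dB a t := by
          rw [Finset.sum_range_succ, Finset.sum_comm]
        rw [hswap]
        ring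
      · rw [if_neg (show ¬(a = K ∧ b < mN) from fun h => haK h.1), add_zero]
        by_cases hlt : a < K
        · rw [if_pos hlt, if_pos (by omega)]
        · rw [if_neg hlt, if_neg (by omega), add_zero]

-- getElem bridges for the final list extensionality
lemma rlen_eq_get (d : List (List Int)) (i : Nat) (hi : i < d.length) :
    (d[i]'hi).length = rlen d i := by
  simp [rlen, List.getD_eq_getElem?_getD, List.getElem?_eq_getElem hi]

lemma cell_eq_get (d : List (List Int)) (i j : Nat) (hi : i < d.length)
    (hj : j < (d[i]'hi).length) : (d[i]'hi)[j]'hj = cell d i j := by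
  simp [cell, List.getD_eq_getElem?_getD, List.getElem?_eq_getElem hi, List.getElem?_eq_getElem hj]

-- ===== VERDICT (by name: the statement is the Claim_ definition above) =====
theorem applyDiff2D_spec : Claim_equal_applyDiff2D := by
  intro mat opr _hdom hpre
  obtain ⟨hne, hrows, hops⟩ := hpre
  unfold Spec_applyDiff2D applyDiff2D applyDiff2D_alt
  set nN := mat.length with hnN
  set mN := (mat.getD 0 []).length with hmN
  have hn1 : 1 ≤ nN := by
    rcases mat with _ | ⟨r, mat'⟩
    · exact absurd rfl hne
    · simp [hnN]
  have hok : ∀ op ∈ opr, opOK nN mN op := fun op ho => hops op ho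
  -- A-side chain
  obtain ⟨⟨hL1, hR1⟩, hC1⟩ := diffFold_cell nN mN opr (pad nN mN) hok (pad_length nN mN)
    (fun a ha => pad_rlen nN mN a ha)
  set D1 := opr.foldl (diffOp (nN : Int) (mN : Int)) (pad nN mN) with hD1
  obtain ⟨⟨hL2, hR2⟩, hC2⟩ := rowPass_cell mN nN D1 (by rw [hL1]; omega)
    (fun a ha => by rw [hR1 a (by rwa [hL1] at ha)]; omega)
  set D2 := (PySem.List.pyRange 0 (nN : Int) 1).foldl (rowStep (mN : Int)) D1 with hD2
  obtain ⟨⟨hL3, hR3⟩, hC3⟩ := colPass_cell nN mN D2 (by rw [hL2, hL1]; omega)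
    (fun a ha => by
      rw [hR2 a]
      rw [hL2, hL1] at ha
      rw [hR1 a ha]
      omega)
  set D3 := (PySem.List.pyRange 0 (mN : Int) 1).foldl (colStep (nN : Int)) D2 with hD3
  -- B-side chain
  obtain ⟨⟨hLB1, hRB1⟩, hCB1⟩ := diffFoldB_cell nN mN opr (pad nN mN) hok (pad_length nN mN)
    (fun a ha => pad_rlen nN mN a ha)
  set dB := opr.foldl (diffOpB (nN : Int) (mN : Int)) (pad nN mN) with hdB
  set res0 := mat.map (fun row => PySem.List.slice row none (some (mN : Int))) with hres0
  have hres0len : res0.length = nN := by rw [hres0, List.length_map]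
  have hres0row : ∀ a, a < nN → res0.getD a [] = (mat.getD a []).take mN := by
    intro a ha
    rw [hres0, List.getD_eq_getElem?_getD, List.getElem?_map,
      List.getElem?_eq_getElem (show a < mat.length from ha), List.getD_eq_getElem?_getD,
      List.getElem?_eq_getElem (show a < mat.length from ha)]
    simp [PySem.List.slice_to_natCast]
  have hres0rlen : ∀ a, a < res0.length → rlen res0 a = mN := by
    intro a ha
    rw [hres0len] at ha
    rw [rlen, hres0row a ha, List.length_take]
    have hmem : mat.getD a [] ∈ mat := by
      rw [List.getD_eq_getElem?_getD, List.getElem?_eq_getElem (show a < mat.length from ha)]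
      exact List.getElem_mem _
    exact Nat.min_eq_left (hrows _ hmem)
  have hres0cell : ∀ a b, a < nN → b < mN → cell res0 a b = cell mat a b := by
    intro a b ha hb
    rw [cell, hres0row a ha, List.getD_eq_getElem?_getD, List.getElem?_take, if_pos hb, cell,
      List.getD_eq_getElem?_getD, List.getD_eq_getElem?_getD]
  obtain ⟨⟨hFc, hFlen, hFrlen⟩, hFcol, hFcell⟩ :=
    fuseRow_pass dB mN nN (List.replicate mN (0 : Int)) res0
      (List.length_replicate) (by rw [hres0len]) hres0rlen
  set stF := (PySem.List.pyRange 0 (nN : Int) 1).foldl (fuseRow dB (mN : Int))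
      (List.replicate mN (0 : Int), res0) with hstF
  -- the two point values coincide
  have hkey : ∀ a b, a < nN → b < mN →
      cell D3 a b = ∑ s ∈ Finset.range (a + 1), ∑ t ∈ Finset.range (b + 1), cell dB s t := by
    intro a b ha hb
    rw [hC3 a b, if_pos ⟨hb, ha⟩]
    have hs1 : (∑ s ∈ Finset.range (a + 1), cell D2 s b)
        = ∑ s ∈ Finset.range (a + 1), ∑ t ∈ Finset.range (b + 1), cell D1 s t :=
      Finset.sum_congr rfl (fun s hs => by
        rw [hC2 s b, if_pos ⟨by simp at hs; omega, hb⟩])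
    rw [hs1]
    refine Finset.sum_congr rfl (fun s hs => Finset.sum_congr rfl (fun t ht => ?_))
    simp only [Finset.mem_range] at hs ht
    rw [hC1 s t, hCB1 s t]
    simp only [pad_cell, zero_add]
    exact congrArg List.sum (List.map_congr_left (fun op ho =>
      (deltaB_eq_delta nN mN op (hok op ho) s t (by omega) (by omega)).symm))
  -- A's render as a map of maps
  have hrender : render mat D3
      = (List.range nN).map (fun i => (List.range mN).map (fun j => cell mat i j + cell D3 i j)) := by
    unfold render
    rw [← hnN, ← hmN, PySem.List.foldl_append_singleton_eq_map, List.nil_append,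
      PySem.List.pyRange_zero_nat nN, List.map_map]
    refine List.map_congr_left (fun iN _ => ?_)
    simp only [Function.comp_apply]
    rw [PySem.List.foldl_append_singleton_eq_map, List.nil_append,
      PySem.List.pyRange_zero_nat mN, List.map_map]
    exact List.map_congr_left (fun jN _ => by
      simp only [Function.comp_apply]
      rw [readC_cell, readC_cell])
  rw [hrender]
  -- final extensionality
  have hlenF : stF.2.length = nN := by rw [hFlen, hres0len]
  apply List.ext_getElem
  · rw [List.length_map, List.length_range, hlenF]
  · intro i h1 h2
    rw [List.getElem_map, List.getElem_range]
    have hi : i < nN := by rwa [List.length_map, List.length_range] at h1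
    have hiF : i < stF.2.length := by rwa [hlenF]
    apply List.ext_getElem
    · rw [List.length_map, List.length_range, rlen_eq_get stF.2 i hiF, hFrlen i,
        hres0rlen i (by rwa [hres0len])]
    · intro j hj1 hj2
      rw [List.getElem_map, List.getElem_range]
      have hjm : j < mN := by rwa [List.length_map, List.length_range] at hj1
      rw [cell_eq_get stF.2 i j hiF (by rwa [rlen_eq_get stF.2 i hiF, hFrlen i,
        hres0rlen i (by rwa [hres0len])])]
      rw [hFcell i j hjm, if_pos hi, hres0cell i j hi hjm, hkey i j hi hjm]
      have hz : (∑ t ∈ Finset.range (j + 1), (List.replicate mN (0 : Int)).getD t 0) = 0 := by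
        refine Finset.sum_eq_zero fun t _ => ?_
        rw [List.getD_eq_getElem?_getD, List.getElem?_replicate]
        split_ifs <;> rfl
      rw [hz]
      ring
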